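-- pv_equiv track=rewrite | github.com/ce2cs/CS5001 | readability.py | analyze_file_data
-- ===== SOURCE A (Python) =====
-- def analyze_file_data(file_data):
--     '''
--     Function: analyze_file_data
--        Calculates the number of sentences, words, and syllabues in file_data
--     Parameters:
--        file_data -- the data to analyze
--     Returns the number of sentences (int), the number of words (int),
--        and the number of syllables in file_data
--     '''
--     sentences = 0
--     words = 0
--     syllables = 0
--     for line in file_data:
--         curr_word = ""
--         for letter in line:
--             if letter in ['.', '?', '!', ':', ';']:
--                 sentences += 1
--             elif letter == ',':
--                 continue
--             elif letter != ' ':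
--                 curr_word += letter
--             elif letter == ' ':
--                 curr_word = curr_word.strip()
--                 if len(curr_word) > 0:
--                     words += 1
--                     syllables += count_syllables(curr_word)
--                     curr_word = ""
--         curr_word = curr_word.strip()
--         if len(curr_word) > 0:
--             words += 1
--             syllables += count_syllables(curr_word)
--     return sentences, words, syllables
--
-- def count_syllables(word):
--     '''
--     Function: count_syllables
--        Counts the total number of syllables in the provided word
--     Parameters:
--        word -- the word that we want to count the syllables of
--     Returns the number of syllables in the word
--     '''
--     syllables = 0
--     vowels = 0
--     for i in range(len(word)):
--         if word[i].lower() not in ['a', 'e', 'i', 'o', 'u', 'y']: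
--             if vowels >= 1:
--                 syllables += 1
--                 vowels = 0
--         else:
--             vowels += 1
--     if vowels > 0:
--         if vowels != 1 or word[-1].lower() != 'e':
--             syllables += 1
--     return max(syllables, 1)
-- ===== SOURCE B (Python) =====
-- def analyze_file_data(file_data):
--     '''Per line: count sentence punctuation directly, then delete commas and
--     sentence punctuation, split the cleaned line on ' ', strip each token,
--     and count/syllabify the non-empty tokens.'''
--     sentences = 0
--     words = 0
--     syllables = 0
--     for line in file_data:
--         sentences += sum(1 for ch in line if ch in '.?!:;')
--         cleaned = line.translate(str.maketrans('', '', ',.?!:;'))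
--         for token in cleaned.split(' '):
--             token = token.strip()
--             if token:
--                 words += 1
--                 syllables += count_syllables(token)
--     return sentences, words, syllables
--
-- def count_syllables(word):
--     syllables = 0
--     vowels = 0
--     for i in range(len(word)):
--         if word[i].lower() not in ['a', 'e', 'i', 'o', 'u', 'y']:
--             if vowels >= 1:
--                 syllables += 1
--                 vowels = 0
--         else:
--             vowels += 1
--     if vowels > 0:
--         if vowels != 1 or word[-1].lower() != 'e':
--             syllables += 1
--     return max(syllables, 1)
-- ===== Notes on version B (the rewrite author's own statement) =====
-- stated objective: simpler
-- what changed: Replaces A's character-by-character state machine that accumulates the current word across branches with a per-line decomposition: count sentence punctuation directly, delete commas and punctuation, split the cleaned line on ' ', strip each token and count/syllabify the non-empty ones.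
import Mathlib
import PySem

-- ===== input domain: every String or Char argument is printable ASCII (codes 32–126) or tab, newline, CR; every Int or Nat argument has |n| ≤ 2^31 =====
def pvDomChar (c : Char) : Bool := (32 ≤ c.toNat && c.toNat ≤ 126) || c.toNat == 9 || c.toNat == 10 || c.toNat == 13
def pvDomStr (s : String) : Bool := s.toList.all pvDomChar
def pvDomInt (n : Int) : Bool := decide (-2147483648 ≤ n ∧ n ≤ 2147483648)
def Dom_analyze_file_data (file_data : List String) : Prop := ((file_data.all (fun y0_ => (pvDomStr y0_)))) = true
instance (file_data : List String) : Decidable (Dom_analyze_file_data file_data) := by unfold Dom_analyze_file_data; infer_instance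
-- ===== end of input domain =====

-- B replaces A's character-by-character word-accumulator state machine with a per-line
-- clean-then-split decomposition (count punctuation, delete it, split on ' ', strip tokens);
-- objective: simpler. count_syllables is unchanged and shared by both ports.

-- shared helper: identical in Source A and Source B
def count_syllables (word : List Char) : Int :=
  let sv := word.foldl (fun (st : Int × Int) c =>
    if ¬ (PySem.Chars.lowerChar c ∈ ['a', 'e', 'i', 'o', 'u', 'y']) then
      if st.2 ≥ 1 then (st.1 + 1, 0) else st
    else (st.1, st.2 + 1)) (0, 0)
  let syll : Int :=
    if sv.2 > 0 then
      if sv.2 ≠ 1 ∨ (PySem.List.pyGet? word (-1)).map PySem.Chars.lowerChar ≠ some 'e' then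
        sv.1 + 1
      else sv.1
    else sv.1
  max syll 1

-- ===== PORT A =====
-- inner loop body: one letter of a line (branches in A's order)
def pvStepA (st : (Int × Int × Int) × List Char) (c : Char) : (Int × Int × Int) × List Char :=
  if c ∈ ['.', '?', '!', ':', ';'] then ((st.1.1 + 1, st.1.2.1, st.1.2.2), st.2)
  else if c = ',' then st
  else if c ≠ ' ' then (st.1, st.2 ++ [c])
  else
    let cur := PySem.Chars.strip st.2
    if cur.length > 0 then ((st.1.1, st.1.2.1 + 1, st.1.2.2 + count_syllables cur), [])
    else (st.1, [])

-- after the inner loop: flush the pending word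
def pvFlushA (st : (Int × Int × Int) × List Char) : Int × Int × Int :=
  let cur := PySem.Chars.strip st.2
  if cur.length > 0 then (st.1.1, st.1.2.1 + 1, st.1.2.2 + count_syllables cur) else st.1

def pvLineA (acc : Int × Int × Int) (line : String) : Int × Int × Int :=
  pvFlushA (line.toList.foldl pvStepA (acc, []))

def analyze_file_data (file_data : List String) : Int × Int × Int :=
  file_data.foldl pvLineA (0, 0, 0)

-- ===== PORT B =====
-- token loop body: strip, count if non-empty
def pvTokStep (acc : Int × Int) (tok : List Char) : Int × Int :=
  let t := PySem.Chars.strip tok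
  if t ≠ [] then (acc.1 + 1, acc.2 + count_syllables t) else acc

def pvLineB (acc : Int × Int × Int) (line : String) : Int × Int × Int :=
  let cs := line.toList
  let s := acc.1 + ((cs.filter (fun c => c ∈ ['.', '?', '!', ':', ';'])).length : Int)
  let cleaned := cs.filter (fun c => ¬ c ∈ [',', '.', '?', '!', ':', ';'])
  let wy := (PySem.Chars.splitOn cleaned [' ']).foldl pvTokStep (acc.2.1, acc.2.2)
  (s, wy.1, wy.2)

def analyze_file_data_alt (file_data : List String) : Int × Int × Int :=
  file_data.foldl pvLineB (0, 0, 0)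

-- ===== PRECONDITION & SPEC =====
def Spec_analyze_file_data (file_data : List String) (out : Int × Int × Int) : Prop := out = analyze_file_data_alt file_data
instance (file_data : List String) (out : Int × Int × Int) : Decidable (Spec_analyze_file_data file_data out) := by unfold Spec_analyze_file_data; infer_instance

-- ===== CLAIM (what is proved, stated in full; the proofs are below) =====
def Claim_equal_analyze_file_data : Prop := ∀ (file_data : List String), Dom_analyze_file_data file_data → Spec_analyze_file_data file_data (analyze_file_data file_data)

-- ===== LEMMAS AND PROOFS =====

-- proof-side model of Python's  s.split(' ')  on a char list
def pvGlue (pre : List Char) : List (List Char) → List (List Char)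
  | [] => [pre]
  | t :: ts => (pre ++ t) :: ts

def pvSplit : List Char → List (List Char)
  | [] => [[]]
  | c :: rest => if c = ' ' then [] :: pvSplit rest else pvGlue [c] (pvSplit rest)

lemma pvSplit_ne_nil (l : List Char) : pvSplit l ≠ [] := by
  cases l with
  | nil => simp [pvSplit]
  | cons c rest =>
    simp only [pvSplit]
    split
    · simp
    · cases h : pvSplit rest <;> simp [pvGlue]

lemma pvGlue_nil (l : List Char) : pvGlue [] (pvSplit l) = pvSplit l := by
  cases h : pvSplit l with
  | nil => exact absurd h (pvSplit_ne_nil l)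
  | cons t ts => simp [pvGlue]

lemma pvGlue_glue (p q : List Char) (ts : List (List Char)) :
    pvGlue p (pvGlue q ts) = pvGlue (p ++ q) ts := by
  cases ts <;> simp [pvGlue]

lemma pvGo_spec : ∀ (l : List Char) (fuel : Nat) (cur : List Char) (acc : List (List Char)),
    l.length < fuel →
    PySem.Chars.splitOn.go [' '] fuel l cur acc = acc.reverse ++ pvGlue cur.reverse (pvSplit l) := by
  intro l
  induction l with
  | nil =>
    intro fuel cur acc h
    match fuel with
    | 0 => omega
    | fuel + 1 => simp [PySem.Chars.splitOn.go, pvSplit, pvGlue]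
  | cons c rest ih =>
    intro fuel cur acc h
    match fuel with
    | 0 => omega
    | fuel + 1 =>
      simp only [List.length_cons] at h
      by_cases hc : c = ' '
      · subst hc
        rw [show PySem.Chars.splitOn.go [' '] (fuel + 1) (' ' :: rest) cur acc
              = PySem.Chars.splitOn.go [' '] fuel rest [] (cur.reverse :: acc) by
            simp [PySem.Chars.splitOn.go, List.isPrefixOf]]
        rw [ih fuel [] (cur.reverse :: acc) (by omega)]
        simp only [List.reverse_nil]
        rw [pvGlue_nil]
        simp only [pvSplit, if_true, List.reverse_cons, List.append_assoc,
          List.singleton_append]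
        rw [show pvGlue cur.reverse ([] :: pvSplit rest) = cur.reverse :: pvSplit rest by
          simp [pvGlue]]
      · rw [show PySem.Chars.splitOn.go [' '] (fuel + 1) (c :: rest) cur acc
              = PySem.Chars.splitOn.go [' '] fuel rest (c :: cur) acc by
            simp [PySem.Chars.splitOn.go, List.isPrefixOf,
              show ¬(' ' = c) from fun h => hc h.symm]]
        rw [ih fuel (c :: cur) acc (by omega)]
        simp only [pvSplit, if_neg hc, List.reverse_cons, pvGlue_glue]

lemma splitOn_space_eq (l : List Char) : PySem.Chars.splitOn l [' '] = pvSplit l := by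
  rw [show PySem.Chars.splitOn l [' '] = PySem.Chars.splitOn.go [' '] (l.length + 1) l [] []
        from rfl]
  rw [pvGo_spec l (l.length + 1) [] [] (by omega)]
  simp only [List.reverse_nil, List.nil_append]
  exact pvGlue_nil l

-- flushing the pending word = B's token step on it
lemma pvFlush_tok (s w y : Int) (cur : List Char) :
    pvFlushA ((s, w, y), cur) = (s, (pvTokStep (w, y) cur).1, (pvTokStep (w, y) cur).2) := by
  simp only [pvFlushA, pvTokStep]
  by_cases hh : PySem.Chars.strip cur = []
  · simp [hh]
  · have hl : 0 < (PySem.Chars.strip cur).length := List.length_pos_iff.mpr hh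
    simp [hh, hl]

lemma pvStepA_space (s w y : Int) (cur : List Char) :
    pvStepA ((s, w, y), cur) ' '
      = ((s, (pvTokStep (w, y) cur).1, (pvTokStep (w, y) cur).2), []) := by
  simp only [pvStepA, pvTokStep]
  norm_num
  by_cases hh : PySem.Chars.strip cur = []
  · simp [hh]
  · have hl : 0 < (PySem.Chars.strip cur).length := List.length_pos_iff.mpr hh
    simp [hh, hl]

-- the word-accumulator state machine of A = clean-then-split of B, one line at a time
lemma pvInner : ∀ (cs : List Char) (s w y : Int) (cur : List Char), ' ' ∉ cur →
    pvFlushA (cs.foldl pvStepA ((s, w, y), cur)) =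
      (s + ((cs.filter (fun c => c ∈ ['.', '?', '!', ':', ';'])).length : Int),
       (pvGlue cur (pvSplit (cs.filter (fun c => ¬ c ∈ [',', '.', '?', '!', ':', ';'])))).foldl
         pvTokStep (w, y)) := by
  intro cs
  induction cs with
  | nil =>
    intro s w y cur hcur
    simp only [List.foldl_nil, List.filter_nil, pvSplit, pvFlush_tok]
    rw [show pvGlue cur [[]] = [cur ++ []] by simp [pvGlue]]
    simp
  | cons c rest ih =>
    intro s w y cur hcur
    by_cases hp : c ∈ ['.', '?', '!', ':', ';']
    · have hstep : pvStepA ((s, w, y), cur) c = ((s + 1, w, y), cur) := by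
        simp [pvStepA, hp]
      rw [List.foldl_cons, hstep, ih (s + 1) w y cur hcur,
        List.filter_cons_of_pos (by simpa using hp),
        List.filter_cons_of_neg (by simp at hp ⊢; rcases hp with h|h|h|h|h <;> simp [h])]
      simp only [List.length_cons]
      congr 1
      push_cast
      ring
    · by_cases hcm : c = ','
      · have hstep : pvStepA ((s, w, y), cur) c = ((s, w, y), cur) := by
          simp [pvStepA, hcm]
        rw [List.foldl_cons, hstep, ih s w y cur hcur,
          List.filter_cons_of_neg (by simpa using hp),
          List.filter_cons_of_neg (by simp [hcm])]
      · by_cases hsp : c = ' '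
        · subst hsp
          rw [List.foldl_cons, pvStepA_space,
            ih s (pvTokStep (w, y) cur).1 (pvTokStep (w, y) cur).2 [] (by simp),
            pvGlue_nil,
            List.filter_cons_of_neg (by decide),
            List.filter_cons_of_pos (by decide)]
          simp only [pvSplit, if_true]
          rw [show pvGlue cur ([] :: pvSplit (rest.filter
                (fun c => ¬ c ∈ [',', '.', '?', '!', ':', ';'])))
              = cur :: pvSplit (rest.filter (fun c => ¬ c ∈ [',', '.', '?', '!', ':', ';'])) by
            simp [pvGlue]]
          rw [List.foldl_cons]
        · have hstep : pvStepA ((s, w, y), cur) c = ((s, w, y), cur ++ [c]) := by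
            simp [pvStepA, hp, hcm, hsp]
          have hcur' : ' ' ∉ cur ++ [c] := by
            simp only [List.mem_append, List.mem_singleton]
            rintro (h | h)
            · exact hcur h
            · exact hsp h.symm
          rw [List.foldl_cons, hstep, ih s w y (cur ++ [c]) hcur',
            List.filter_cons_of_neg (by simpa using hp),
            List.filter_cons_of_pos (by simp at hp ⊢; exact ⟨hcm, by simpa using hp⟩)]
          simp only [pvSplit, if_neg hsp, pvGlue_glue]

lemma pvLine_eq (acc : Int × Int × Int) (line : String) : pvLineA acc line = pvLineB acc line := by
  obtain ⟨s, w, y⟩ := acc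
  simp only [pvLineA, pvLineB, splitOn_space_eq]
  rw [pvInner line.toList s w y [] (by simp), pvGlue_nil]

-- ===== VERDICT (by name: the statement is the Claim_ definition above) =====
theorem analyze_file_data_spec : Claim_equal_analyze_file_data := by
  intro fd _
  unfold Spec_analyze_file_data analyze_file_data analyze_file_data_alt
  rw [show pvLineA = pvLineB from funext₂ pvLine_eq]
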